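-- pv_equiv track=rewrite | github.com/Jordano700/PeptiDIA | scripts/xgb_feature_selection_search.py | make_feature_blocks
-- ===== SOURCE A (Python) =====
-- from typing import Dict, List, Optional, Tuple
--
-- def make_feature_blocks(columns: List[str]) -> Dict[str, List[str]]:
--     blocks = {
--         "logs": [c for c in columns if c.startswith("log_")],
--         "ratios": [c for c in columns if c.startswith("ratio_")],
--         "sequence": [c for c in columns if c == "sequence_length" or c.startswith("aa_count_") or c.startswith("aa_freq_")],
--         "stats": [c for c in columns if c.startswith("zscore_")],
--     }
--     other = [c for c in columns if all(c not in v for v in blocks.values())]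
--     # Exclude any leakage-like columns defensively
--     other = [c for c in other if c not in {"source_fdr"}]
--     if other:
--         blocks["other"] = other
--     return blocks
-- ===== SOURCE B (Python) =====
-- def make_feature_blocks(columns):
--     logs, ratios, sequence, stats, other = [], [], [], [], []
--     for c in columns:
--         if c.startswith("log_"):
--             logs.append(c)
--         elif c.startswith("ratio_"):
--             ratios.append(c)
--         elif c == "sequence_length" or c.startswith("aa_count_") or c.startswith("aa_freq_"):
--             sequence.append(c)
--         elif c.startswith("zscore_"):
--             stats.append(c)
--         elif c != "source_fdr":
--             other.append(c)
--     blocks = {"logs": logs, "ratios": ratios, "sequence": sequence, "stats": stats}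
--     if other:
--         blocks["other"] = other
--     return blocks
-- ===== Notes on version B (the rewrite author's own statement) =====
-- stated objective: faster
-- what changed: Replaces five separate comprehension passes plus a quadratic membership scan over all block values with one single pass whose if/elif fall-through classifies each column directly (the 'other' list arises from the else branch, not from membership tests).
import Mathlib
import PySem

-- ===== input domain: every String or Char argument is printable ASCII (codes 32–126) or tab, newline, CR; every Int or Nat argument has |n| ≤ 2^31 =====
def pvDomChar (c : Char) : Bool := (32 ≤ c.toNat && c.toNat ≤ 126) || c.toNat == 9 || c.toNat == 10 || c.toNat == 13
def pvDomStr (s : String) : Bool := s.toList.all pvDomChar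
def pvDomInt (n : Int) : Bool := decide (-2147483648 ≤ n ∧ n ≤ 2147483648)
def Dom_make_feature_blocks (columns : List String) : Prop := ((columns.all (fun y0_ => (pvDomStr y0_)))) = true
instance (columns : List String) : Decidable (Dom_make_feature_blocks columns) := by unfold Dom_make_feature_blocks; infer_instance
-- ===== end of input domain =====

-- B replaces A's five comprehension passes plus a quadratic membership scan with one
-- single classifying pass (if/elif fall-through); return value equivalence, no mutation.


-- ===== PORT A =====
def make_feature_blocks (columns : List String) : List (String × List String) :=
  let logs := columns.filter (fun c => PySem.Str.startswith c "log_")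
  let ratios := columns.filter (fun c => PySem.Str.startswith c "ratio_")
  let sequence := columns.filter (fun c =>
    c == "sequence_length" || PySem.Str.startswith c "aa_count_" || PySem.Str.startswith c "aa_freq_")
  let stats := columns.filter (fun c => PySem.Str.startswith c "zscore_")
  let vals := [logs, ratios, sequence, stats]
  let other := columns.filter (fun c => vals.all (fun v => !(v.contains c)))
  -- Exclude any leakage-like columns defensively
  let other2 := other.filter (fun c => !((["source_fdr"] : List String).contains c))
  let blocks := [("logs", logs), ("ratios", ratios), ("sequence", sequence), ("stats", stats)]
  if other2.isEmpty then blocks else blocks ++ [("other", other2)]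

-- ===== PORT B =====
-- the single forward loop of Source B, as structural recursion over the columns
def mfbGo : List String → List String × List String × List String × List String × List String
  | [] => ([], [], [], [], [])
  | c :: rest =>
    let (l, r, s, z, o) := mfbGo rest
    if PySem.Str.startswith c "log_" then (c :: l, r, s, z, o)
    else if PySem.Str.startswith c "ratio_" then (l, c :: r, s, z, o)
    else if c == "sequence_length" || PySem.Str.startswith c "aa_count_" || PySem.Str.startswith c "aa_freq_" then (l, r, c :: s, z, o)
    else if PySem.Str.startswith c "zscore_" then (l, r, s, c :: z, o)
    else if !(c == "source_fdr") then (l, r, s, z, c :: o)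
    else (l, r, s, z, o)

def make_feature_blocks_alt (columns : List String) : List (String × List String) :=
  let (l, r, s, z, o) := mfbGo columns
  let blocks := [("logs", l), ("ratios", r), ("sequence", s), ("stats", z)]
  if o.isEmpty then blocks else blocks ++ [("other", o)]

-- ===== PRECONDITION & SPEC =====
def Spec_make_feature_blocks (columns : List String) (out : List (String × List String)) : Prop := out = make_feature_blocks_alt columns
instance (columns : List String) (out : List (String × List String)) : Decidable (Spec_make_feature_blocks columns out) := by unfold Spec_make_feature_blocks; infer_instance

-- ===== CLAIM (what is proved, stated in full; the proofs are below) =====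
def Claim_equal_make_feature_blocks : Prop := ∀ (columns : List String), Dom_make_feature_blocks columns → Spec_make_feature_blocks columns (make_feature_blocks columns)


-- ===== LEMMAS AND PROOFS =====

def pL (c : String) : Bool := PySem.Str.startswith c "log_"
def pR (c : String) : Bool := PySem.Str.startswith c "ratio_"
def pS (c : String) : Bool :=
  c == "sequence_length" || PySem.Str.startswith c "aa_count_" || PySem.Str.startswith c "aa_freq_"
def pZ (c : String) : Bool := PySem.Str.startswith c "zscore_"
def pO (c : String) : Bool := !pL c && !pR c && !pS c && !pZ c && !(c == "source_fdr")

-- two incomparable patterns cannot both be prefixes of the same string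
theorem sw_disj (c p q : String)
    (hpq : ¬ (p.toList <+: q.toList)) (hqp : ¬ (q.toList <+: p.toList))
    (h1 : PySem.Str.startswith c p = true) : PySem.Str.startswith c q = false := by
  by_contra h
  have h2 : PySem.Str.startswith c q = true := by
    cases hq : PySem.Str.startswith c q <;> simp_all
  have hp' : p.toList <+: c.toList := by
    have e := PySem.Str.startswith_eq c p; rw [e] at h1
    exact (PySem.Chars.startswith_iff _ _).mp h1
  have hq' : q.toList <+: c.toList := by
    have e := PySem.Str.startswith_eq c q; rw [e] at h2
    exact (PySem.Chars.startswith_iff _ _).mp h2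
  rcases List.prefix_or_prefix_of_prefix hp' hq' with h' | h'
  · exact hpq h'
  · exact hqp h'

theorem go_spec (columns : List String) :
    mfbGo columns = (columns.filter pL, columns.filter pR, columns.filter pS,
      columns.filter pZ, columns.filter pO) := by
  induction columns with
  | nil => rfl
  | cons c rest ih =>
    simp only [mfbGo, ih]
    split_ifs with h1 h2 h3 h4 h5
    · -- log_
      have fL : pL c = true := h1
      have fR : pR c = false := sw_disj c "log_" "ratio_" (by decide) (by decide) h1
      have bseq : (c == "sequence_length") = false := by
        cases hb : c == "sequence_length"
        · rfl
        · have hc : c = "sequence_length" := eq_of_beq hb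
          subst hc; exact absurd h1 (by decide)
      have b3a : PySem.Str.startswith c "aa_count_" = false :=
        sw_disj c "log_" "aa_count_" (by decide) (by decide) h1
      have b3b : PySem.Str.startswith c "aa_freq_" = false :=
        sw_disj c "log_" "aa_freq_" (by decide) (by decide) h1
      have fS : pS c = false := by unfold pS; rw [bseq, b3a, b3b]; rfl
      have fZ : pZ c = false := sw_disj c "log_" "zscore_" (by decide) (by decide) h1
      have fO : pO c = false := by unfold pO; rw [fL]; rfl
      simp [fL, fR, fS, fZ, fO]
    · -- ratio_
      have fL : pL c = false := Bool.eq_false_iff.mpr h1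
      have fR : pR c = true := h2
      have bseq : (c == "sequence_length") = false := by
        cases hb : c == "sequence_length"
        · rfl
        · have hc : c = "sequence_length" := eq_of_beq hb
          subst hc; exact absurd h2 (by decide)
      have b3a : PySem.Str.startswith c "aa_count_" = false :=
        sw_disj c "ratio_" "aa_count_" (by decide) (by decide) h2
      have b3b : PySem.Str.startswith c "aa_freq_" = false :=
        sw_disj c "ratio_" "aa_freq_" (by decide) (by decide) h2
      have fS : pS c = false := by unfold pS; rw [bseq, b3a, b3b]; rfl
      have fZ : pZ c = false := sw_disj c "ratio_" "zscore_" (by decide) (by decide) h2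
      have fO : pO c = false := by unfold pO; rw [fR]; simp
      simp [fL, fR, fS, fZ, fO]
    · -- sequence
      have fL : pL c = false := Bool.eq_false_iff.mpr h1
      have fR : pR c = false := Bool.eq_false_iff.mpr h2
      have fS : pS c = true := h3
      have fZ : pZ c = false := by
        rcases Bool.or_eq_true_iff.mp h3 with h' | hb
        · rcases Bool.or_eq_true_iff.mp h' with hseq | ha
          · have hc : c = "sequence_length" := eq_of_beq hseq
            subst hc; decide
          · exact sw_disj c "aa_count_" "zscore_" (by decide) (by decide) ha
        · exact sw_disj c "aa_freq_" "zscore_" (by decide) (by decide) hb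
      have fO : pO c = false := by unfold pO; rw [fS]; simp
      simp [fL, fR, fS, fZ, fO]
    · -- zscore_
      have fL : pL c = false := Bool.eq_false_iff.mpr h1
      have fR : pR c = false := Bool.eq_false_iff.mpr h2
      have fS : pS c = false := Bool.eq_false_iff.mpr h3
      have fZ : pZ c = true := h4
      have fO : pO c = false := by unfold pO; rw [fZ]; simp
      simp [fL, fR, fS, fZ, fO]
    · -- other
      have fL : pL c = false := Bool.eq_false_iff.mpr h1
      have fR : pR c = false := Bool.eq_false_iff.mpr h2
      have fS : pS c = false := Bool.eq_false_iff.mpr h3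
      have fZ : pZ c = false := Bool.eq_false_iff.mpr h4
      have fO : pO c = true := by unfold pO; rw [fL, fR, fS, fZ, h5]; rfl
      simp [fL, fR, fS, fZ, fO]
    · -- source_fdr: dropped everywhere
      have fL : pL c = false := Bool.eq_false_iff.mpr h1
      have fR : pR c = false := Bool.eq_false_iff.mpr h2
      have fS : pS c = false := Bool.eq_false_iff.mpr h3
      have fZ : pZ c = false := Bool.eq_false_iff.mpr h4
      have hb : (!(c == "source_fdr")) = false := Bool.eq_false_iff.mpr h5
      have fO : pO c = false := by unfold pO; rw [hb]; simp
      simp [fL, fR, fS, fZ, fO]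

theorem contains_filter_eq (columns : List String) (p : String → Bool) (c : String)
    (hc : c ∈ columns) : (columns.filter p).contains c = p c := by
  cases hp : p c
  · apply Bool.eq_false_iff.mpr
    intro h
    have hm := List.mem_filter.mp (List.contains_iff_mem.mp h)
    simp [hp] at hm
  · exact List.contains_iff_mem.mpr (List.mem_filter.mpr ⟨hc, hp⟩)

theorem pvBeqDecide (c d : String) : (c == d) = decide (c = d) := by
  cases hd : decide (c = d) <;> simp_all

theorem other_eq (columns : List String) :
    ((columns.filter (fun c =>
        ([columns.filter pL, columns.filter pR, columns.filter pS, columns.filter pZ].all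
          (fun v => !(v.contains c))))).filter
      (fun c => !((["source_fdr"] : List String).contains c)))
    = columns.filter pO := by
  rw [List.filter_filter]
  apply List.filter_congr
  intro c hc
  simp only [List.all_cons, List.all_nil,
    contains_filter_eq columns pL c hc, contains_filter_eq columns pR c hc,
    contains_filter_eq columns pS c hc, contains_filter_eq columns pZ c hc, pO]
  cases hL : pL c <;> cases hR : pR c <;> cases hS : pS c <;> cases hZ : pZ c <;>
    simp [pvBeqDecide]

-- ===== VERDICT (by name: the statement is the Claim_ definition above) =====
theorem make_feature_blocks_spec : Claim_equal_make_feature_blocks := by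
  intro columns _
  show make_feature_blocks columns = make_feature_blocks_alt columns
  have e2 : make_feature_blocks_alt columns =
      (if (columns.filter pO).isEmpty then
        [("logs", columns.filter pL), ("ratios", columns.filter pR),
         ("sequence", columns.filter pS), ("stats", columns.filter pZ)]
       else
        [("logs", columns.filter pL), ("ratios", columns.filter pR),
         ("sequence", columns.filter pS), ("stats", columns.filter pZ)] ++
          [("other", columns.filter pO)]) := by
    unfold make_feature_blocks_alt
    rw [go_spec]
  rw [e2, ← other_eq]
  rfl
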